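-- pv_equiv track=rewrite | github.com/alexander-hanel/capstool | capstool/capstool.py | _canonicalize_register_name
-- ===== SOURCE A (Python) =====
-- def _canonicalize_register_name(reg_name):
--     """
--     Collapse subregister names into a stable general-purpose register family.
--     :param reg_name:
--     :return:
--     """
--     if not reg_name:
--         return None
--     register_groups = {
--         "rax": {"rax", "eax", "ax", "al", "ah"},
--         "rbx": {"rbx", "ebx", "bx", "bl", "bh"},
--         "rcx": {"rcx", "ecx", "cx", "cl", "ch"},
--         "rdx": {"rdx", "edx", "dx", "dl", "dh"},
--         "rsi": {"rsi", "esi", "si", "sil"},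
--         "rdi": {"rdi", "edi", "di", "dil"},
--         "rbp": {"rbp", "ebp", "bp", "bpl"},
--         "rsp": {"rsp", "esp", "sp", "spl"},
--         "r8": {"r8", "r8d", "r8w", "r8b"},
--         "r9": {"r9", "r9d", "r9w", "r9b"},
--         "r10": {"r10", "r10d", "r10w", "r10b"},
--         "r11": {"r11", "r11d", "r11w", "r11b"},
--         "r12": {"r12", "r12d", "r12w", "r12b"},
--         "r13": {"r13", "r13d", "r13w", "r13b"},
--         "r14": {"r14", "r14d", "r14w", "r14b"},
--         "r15": {"r15", "r15d", "r15w", "r15b"},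
--     }
--     lowered = reg_name.lower()
--     for canonical, variants in register_groups.items():
--         if lowered in variants:
--             return canonical
--     return lowered
-- ===== SOURCE B (Python) =====
-- _CORES = ("ax", "bx", "cx", "dx", "si", "di", "bp", "sp")
-- _NUM_BASES = ("8", "9", "10", "11", "12", "13", "14", "15")
--
--
-- def _canonicalize_register_name(reg_name):
--     """
--     Collapse subregister names into a stable general-purpose register family
--     by rewriting the name structurally (strip a size suffix on numbered
--     registers, rebuild the 64-bit name from a legacy register's core) instead
--     of looking it up in a table.
--     """
--     if not reg_name:
--         return None
--     lowered = reg_name.lower()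
--     # numbered GP registers r8..r15 with an optional d/w/b size suffix
--     if lowered.startswith("r"):
--         base = lowered[1:]
--         if base and base[-1] in "dwb":
--             base = base[:-1]
--         if base in _NUM_BASES:
--             return "r" + base
--     # legacy registers: find the two-letter core, then prepend "r"
--     core = None
--     if len(lowered) == 3 and lowered[0] in "re" and lowered[1:] in _CORES:
--         core = lowered[1:]          # rax/eax, rsi/esi, ...
--     elif lowered in _CORES:
--         core = lowered              # ax, si, ...
--     elif len(lowered) == 2 and lowered[1] in "lh" and lowered[0] in "abcd":
--         core = lowered[0] + "x"     # al, ah, bl, ...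
--     elif len(lowered) == 3 and lowered[2] == "l" and lowered[:2] in ("si", "di", "bp", "sp"):
--         core = lowered[:2]          # sil, dil, bpl, spl
--     if core is None:
--         return lowered
--     return "r" + core
-- ===== Notes on version B (the rewrite author's own statement) =====
-- stated objective: alternative
-- what changed: Replaces A's scan over 16 (canonical, variant-set) table groups with a structural rewrite of the name itself: strip the d/w/b size suffix of numbered registers r8..r15, and for legacy registers extract the two-letter core (from the e/r prefix form, the bare core, the l/h byte form or the sil-style form) and prepend 'r'; no per-family table is consulted.
import Mathlib
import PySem

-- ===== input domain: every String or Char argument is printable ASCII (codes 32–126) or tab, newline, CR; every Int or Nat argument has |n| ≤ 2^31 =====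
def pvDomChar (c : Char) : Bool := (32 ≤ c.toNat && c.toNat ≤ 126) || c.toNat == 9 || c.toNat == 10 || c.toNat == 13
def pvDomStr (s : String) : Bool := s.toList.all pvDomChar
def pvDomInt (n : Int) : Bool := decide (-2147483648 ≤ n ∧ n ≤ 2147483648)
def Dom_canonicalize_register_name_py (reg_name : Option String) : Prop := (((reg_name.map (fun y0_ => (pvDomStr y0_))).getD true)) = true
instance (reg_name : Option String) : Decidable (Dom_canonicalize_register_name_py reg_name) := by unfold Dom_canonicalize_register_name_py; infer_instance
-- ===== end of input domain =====

-- B (alternative): instead of A's scan over 16 table groups, B rewrites the name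
-- structurally (strip d/w/b on r8..r15, rebuild "r"+core for legacy registers).

-- ===== PORT A =====
-- A's register_groups dict: assoc list canonical → set of variants (PySem.Set as distinct list).
def pvRegisterGroupsA : List (String × List String) :=
  [("rax", ["rax", "eax", "ax", "al", "ah"]),
   ("rbx", ["rbx", "ebx", "bx", "bl", "bh"]),
   ("rcx", ["rcx", "ecx", "cx", "cl", "ch"]),
   ("rdx", ["rdx", "edx", "dx", "dl", "dh"]),
   ("rsi", ["rsi", "esi", "si", "sil"]),
   ("rdi", ["rdi", "edi", "di", "dil"]),
   ("rbp", ["rbp", "ebp", "bp", "bpl"]),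
   ("rsp", ["rsp", "esp", "sp", "spl"]),
   ("r8", ["r8", "r8d", "r8w", "r8b"]),
   ("r9", ["r9", "r9d", "r9w", "r9b"]),
   ("r10", ["r10", "r10d", "r10w", "r10b"]),
   ("r11", ["r11", "r11d", "r11w", "r11b"]),
   ("r12", ["r12", "r12d", "r12w", "r12b"]),
   ("r13", ["r13", "r13d", "r13w", "r13b"]),
   ("r14", ["r14", "r14d", "r14w", "r14b"]),
   ("r15", ["r15", "r15d", "r15w", "r15b"])]

-- A's for-loop over register_groups.items(): return the first canonical whose variants contain lowered.
def pvScanGroupsA (lowered : String) : List (String × List String) → String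
  | [] => lowered
  | (canonical, variants) :: rest =>
    if variants.contains lowered then canonical else pvScanGroupsA lowered rest

def canonicalize_register_name_py (reg_name : Option String) : Option String :=
  match reg_name with
  | none => none
  | some s =>
    if s = "" then none
    else
      let lowered := PySem.Str.lower s
      some (pvScanGroupsA lowered pvRegisterGroupsA)

-- ===== PORT B =====
-- Source B's module constants, as lists of char-lists (string work done on List Char via PySem.Chars; exact on ASCII and beyond, since
-- only char-by-char structure is inspected).
def pvCoresB : List (List Char) :=
  [['a','x'], ['b','x'], ['c','x'], ['d','x'], ['s','i'], ['d','i'], ['b','p'], ['s','p']]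
def pvNumBasesB : List (List Char) :=
  [['8'], ['9'], ['1','0'], ['1','1'], ['1','2'], ['1','3'], ['1','4'], ['1','5']]

-- Source B's legacy-core chain: the four if/elif guards in order (len-3 and len-2 guards are split
-- by the list's shape; Python's order between the disjoint length cases is immaterial).
def pvLegacyB (lowered : List Char) : List Char :=
  match lowered with
  | [p, a, b] =>
    if (p = 'r' ∨ p = 'e') ∧ pvCoresB.contains [a, b] then 'r' :: [a, b]        -- rax/eax form
    else if b = 'l' ∧ [['s','i'], ['d','i'], ['b','p'], ['s','p']].contains [p, a] then 'r' :: [p, a]  -- sil form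
    else lowered                                                                 -- core is None
  | [a, b] =>
    if pvCoresB.contains [a, b] then 'r' :: [a, b]                               -- bare core ax/si
    else if (b = 'l' ∨ b = 'h') ∧ (a = 'a' ∨ a = 'b' ∨ a = 'c' ∨ a = 'd') then ['r', a, 'x']  -- al/ah form
    else lowered
  | _ => lowered

-- Source B's "if base and base[-1] in \"dwb\": base = base[:-1]" (empty base gives getLast? = none, so the guard is exact).
def pvBaseB (rest : List Char) : List Char :=
  if rest.getLast? = some 'd' ∨ rest.getLast? = some 'w' ∨ rest.getLast? = some 'b'
  then rest.dropLast else rest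

-- Source B's body after the empty guard: numbered-register rewrite, else the legacy chain.
def pvRewriteB (lowered : List Char) : List Char :=
  match lowered with
  | [] => pvLegacyB []
  | c :: rest =>
    if c = 'r' then                                                              -- lowered.startswith("r")
      let base := pvBaseB rest
      if pvNumBasesB.contains base then 'r' :: base
      else pvLegacyB (c :: rest)
    else pvLegacyB (c :: rest)

def canonicalize_register_name_py_alt (reg_name : Option String) : Option String :=
  match reg_name with
  | none => none
  | some s =>
    if s = "" then none
    else
      let lowered := (PySem.Str.lower s).toList
      some (String.ofList (pvRewriteB lowered))

-- ===== PRECONDITION & SPEC =====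
def Spec_canonicalize_register_name_py (reg_name : Option String) (out : Option String) : Prop := out = canonicalize_register_name_py_alt reg_name
instance (reg_name : Option String) (out : Option String) : Decidable (Spec_canonicalize_register_name_py reg_name out) := by unfold Spec_canonicalize_register_name_py; infer_instance

-- ===== CLAIM (what is proved, stated in full; the proofs are below) =====
def Claim_equal_canonicalize_register_name_py : Prop := ∀ (reg_name : Option String), Dom_canonicalize_register_name_py reg_name → Spec_canonicalize_register_name_py reg_name (canonicalize_register_name_py reg_name)

-- ===== LEMMAS AND PROOFS =====

-- All 48 variant names of A's table (proof-side helper).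
def pvAllVariants : List String :=
  (pvRegisterGroupsA.map Prod.snd).flatten

-- On each of the 48 table names the two computations agree (finite check).
set_option maxRecDepth 4096 in
theorem pv_agree_mem : ∀ l ∈ pvAllVariants,
    pvScanGroupsA l pvRegisterGroupsA = String.ofList (pvRewriteB l.toList) := by
  decide

-- A's scan falls through unchanged when the name is in no group (loop invariant).
theorem pv_scan_gen (l : String) (gs : List (String × List String))
    (h : ∀ p ∈ gs, l ∉ p.2) : pvScanGroupsA l gs = l := by
  induction gs with
  | nil => rfl
  | cons g rest ih =>
    obtain ⟨c, vs⟩ := g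
    have hv : l ∉ vs := h (c, vs) (List.mem_cons_self ..)
    simp only [pvScanGroupsA, List.contains_eq_mem, hv, decide_false, Bool.false_eq_true,
      if_false]
    exact ih fun p hp => h p (List.mem_cons_of_mem _ hp)

-- A name in no group falls through A's scan unchanged.
theorem pv_scan_notmem (l : String) (h : l ∉ pvAllVariants) :
    pvScanGroupsA l pvRegisterGroupsA = l := by
  refine pv_scan_gen l _ fun p hp hl => h ?_
  exact List.mem_flatten.mpr ⟨p.2, List.mem_map.mpr ⟨p, hp, rfl⟩, hl⟩

-- B's legacy chain: a name matching no guard is returned unchanged; each guard forces a table name.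
theorem pv_legacy_notmem (cs : List Char) (hmem : cs ∉ pvAllVariants.map String.toList) :
    pvLegacyB cs = cs := by
  match cs with
  | [] => rfl
  | [a] => rfl
  | [a, b] =>
    simp only [pvLegacyB]
    split_ifs with h1 h2
    · exfalso; apply hmem
      have hb : [a, b] ∈ pvCoresB := by simpa [List.contains_eq_mem] using h1
      simp only [pvCoresB, List.mem_cons, List.not_mem_nil, or_false] at hb
      rcases hb with hb|hb|hb|hb|hb|hb|hb|hb <;>
        · injection hb with e1 e2; injection e2 with e2 _; subst e1; subst e2; decide
    · exfalso; apply hmem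
      obtain ⟨hl, ha⟩ := h2
      rcases hl with rfl|rfl <;> rcases ha with rfl|rfl|rfl|rfl <;> decide
    · rfl
  | [p, a, b] =>
    simp only [pvLegacyB]
    split_ifs with h1 h2
    · exfalso; apply hmem
      obtain ⟨hp, hc⟩ := h1
      have hb : [a, b] ∈ pvCoresB := by simpa [List.contains_eq_mem] using hc
      simp only [pvCoresB, List.mem_cons, List.not_mem_nil, or_false] at hb
      rcases hp with rfl|rfl <;> rcases hb with hb|hb|hb|hb|hb|hb|hb|hb <;>
        · injection hb with e1 e2; injection e2 with e2 _; subst e1; subst e2; decide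
    · exfalso; apply hmem
      obtain ⟨hl, hc⟩ := h2
      subst hl
      have hb : [p, a] ∈ [['s','i'], ['d','i'], ['b','p'], ['s','p']] := by
        simpa [List.contains_eq_mem] using hc
      simp only [List.mem_cons, List.not_mem_nil, or_false] at hb
      rcases hb with hb|hb|hb|hb <;>
        · injection hb with e1 e2; injection e2 with e2 _; subst e1; subst e2; decide
    · rfl
  | a :: b :: c :: d :: t => rfl

-- Each of B's rewrite guards forces the name to be one of the 48 table names.
theorem pv_rewrite_notmem (l : String) (h : l ∉ pvAllVariants) :
    pvRewriteB l.toList = l.toList := by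
  have hmem : l.toList ∉ pvAllVariants.map String.toList := by
    intro hm
    rcases List.mem_map.mp hm with ⟨t, ht, he⟩
    exact h (by rwa [show t = l from String.ext he] at ht)
  revert hmem
  generalize l.toList = cs
  intro hmem
  match cs with
  | [] => rfl
  | c :: rest =>
    simp only [pvRewriteB]
    split_ifs with hr hnum
    · -- numbered guard fired: base is one of the eight bases, so 'r'::rest is a table name
      exfalso; apply hmem
      subst hr
      have hb : pvBaseB rest ∈ pvNumBasesB := by simpa [List.contains_eq_mem] using hnum
      unfold pvBaseB at hb
      by_cases hsuf : rest.getLast? = some 'd' ∨ rest.getLast? = some 'w' ∨ rest.getLast? = some 'b'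
      · rw [if_pos hsuf] at hb
        have hne : rest ≠ [] := by
          rcases hsuf with h1 | h1 | h1 <;> exact fun hnil => by simp [hnil] at h1
        have hrest : rest = rest.dropLast ++ [rest.getLast hne] :=
          (List.dropLast_append_getLast hne).symm
        have hlast : rest.getLast hne = 'd' ∨ rest.getLast hne = 'w' ∨ rest.getLast hne = 'b' := by
          rcases hsuf with h1 | h1 | h1 <;> [left; (right; left); (right; right)] <;>
            · have := List.getLast?_eq_some_getLast (l := rest) hne
              rw [this] at h1; exact Option.some_injective _ h1
        simp only [pvNumBasesB, List.mem_cons, List.not_mem_nil, or_false] at hb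
        rw [hrest]
        rcases hb with hb|hb|hb|hb|hb|hb|hb|hb <;> rw [hb] <;>
          rcases hlast with hl|hl|hl <;> rw [hl] <;> decide
      · rw [if_neg hsuf] at hb
        simp only [pvNumBasesB, List.mem_cons, List.not_mem_nil, or_false] at hb
        rcases hb with hb|hb|hb|hb|hb|hb|hb|hb <;> rw [hb] <;> decide
    · exact pv_legacy_notmem _ hmem
    · exact pv_legacy_notmem _ hmem

-- ===== VERDICT (by name: the statement is the Claim_ definition above) =====
theorem canonicalize_register_name_py_spec : Claim_equal_canonicalize_register_name_py := by
  intro reg_name _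
  unfold Spec_canonicalize_register_name_py
  match reg_name with
  | none => rfl
  | some s =>
    by_cases h : s = ""
    · simp [canonicalize_register_name_py, canonicalize_register_name_py_alt, h]
    · simp only [canonicalize_register_name_py, canonicalize_register_name_py_alt, h, if_false]
      by_cases hmem : PySem.Str.lower s ∈ pvAllVariants
      · rw [pv_agree_mem _ hmem]
      · rw [pv_scan_notmem _ hmem, pv_rewrite_notmem _ hmem, String.ofList_toList]
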